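-- pv_equiv track=rewrite | github.com/asem-ai/labs_1 | lab1/1.py | common_elements_all
-- ===== SOURCE A (Python) =====
-- def common_elements_all(sets_list):
--     if len(sets_list) == 0:
--         return set()
--     result = sets_list[0].copy()
--     for s in sets_list[1:]:
--         result = result & s
--         if len(result) == 0:
--             break
--     return result
-- ===== SOURCE B (Python) =====
-- def common_elements_all(sets_list):
--     counts = {}
--     for s in sets_list:
--         for x in s:
--             counts[x] = counts.get(x, 0) + 1
--     n = len(sets_list)
--     return {x for x in counts if counts[x] == n}
-- ===== Notes on version B (the rewrite author's own statement) =====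
-- stated objective: alternative
-- what changed: Replaces the left fold of pairwise set intersections (with an early break on empty) by a single frequency count over all elements followed by one filtering pass keeping elements whose count equals the number of sets.
import Mathlib
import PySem

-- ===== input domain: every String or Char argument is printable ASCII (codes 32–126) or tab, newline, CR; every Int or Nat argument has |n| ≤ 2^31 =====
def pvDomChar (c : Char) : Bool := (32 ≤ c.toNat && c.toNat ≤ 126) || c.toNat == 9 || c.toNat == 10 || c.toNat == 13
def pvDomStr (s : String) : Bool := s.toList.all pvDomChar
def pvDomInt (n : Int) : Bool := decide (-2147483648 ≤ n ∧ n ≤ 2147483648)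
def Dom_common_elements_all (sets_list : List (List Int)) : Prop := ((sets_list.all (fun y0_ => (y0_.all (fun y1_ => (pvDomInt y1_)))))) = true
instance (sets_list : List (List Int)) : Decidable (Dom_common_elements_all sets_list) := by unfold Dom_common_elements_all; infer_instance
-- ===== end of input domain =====

-- B replaces A's chain of pairwise intersections (with early break) by one frequency
-- count over all elements plus one filtering pass; objective: alternative (same cost).

-- ===== PORT A =====
-- the 'for s in sets_list[1:]' loop with its 'if len(result) == 0: break'
def pvInterLoop (result : PySem.Set Int) (rest : List (List Int)) : PySem.Set Int :=
  match rest with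
  | [] => result
  | s :: ss =>
    let r := PySem.Set.inter result s
    if r.length = 0 then r else pvInterLoop r ss

def common_elements_all (sets_list : List (List Int)) : List Int :=
  match sets_list with
  | [] => (PySem.Set.empty : PySem.Set Int)
  | first :: rest => pvInterLoop (PySem.Set.ofList first) rest

-- ===== PORT B =====
def common_elements_all_alt (sets_list : List (List Int)) : List Int :=
  let counts := sets_list.foldl
    (fun d s => (PySem.Set.ofList s).foldl (fun d x => d.modify x 0 (· + 1)) d)
    (PySem.Dict.empty : PySem.Dict Int Int)
  let n : Int := sets_list.length
  PySem.Set.ofList (counts.keys.filter (fun x => counts.getD x 0 == n))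

-- ===== PRECONDITION & SPEC =====
def Spec_common_elements_all (sets_list : List (List Int)) (out : List Int) : Prop := out = common_elements_all_alt sets_list
instance (sets_list : List (List Int)) (out : List Int) : Decidable (Spec_common_elements_all sets_list out) := by unfold Spec_common_elements_all; infer_instance

-- ===== CLAIM (what is proved, stated in full; the proofs are below) =====
def Claim_equal_common_elements_all : Prop := ∀ (sets_list : List (List Int)), Dom_common_elements_all sets_list → Spec_common_elements_all sets_list (common_elements_all sets_list)

-- ===== LEMMAS AND PROOFS =====

-- A's loop is a filter of the initial set by membership in every remaining set.
theorem pvInterLoop_eq_filter (ss : List (List Int)) (r : PySem.Set Int) :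
    pvInterLoop r ss = r.filter (fun x => ss.all (fun s => PySem.Set.contains s x)) := by
  induction ss generalizing r with
  | nil => simp [pvInterLoop]
  | cons s ss ih =>
    simp only [pvInterLoop, PySem.Set.inter]
    by_cases h : (r.filter (fun x => PySem.Set.contains s x)).length = 0
    · rw [if_pos h]
      rw [List.length_eq_zero_iff] at h
      rw [h]
      symm
      rw [List.filter_eq_nil_iff]
      intro x hx
      have hxs : ¬ (PySem.Set.contains s x = true) := by
        intro hc
        have hmf : x ∈ r.filter (fun x => PySem.Set.contains s x) :=
          List.mem_filter.mpr ⟨hx, hc⟩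
        rw [h] at hmf
        exact List.not_mem_nil hmf
      intro hcontr
      rw [List.all_cons, Bool.and_eq_true] at hcontr
      exact hxs hcontr.1
    · rw [if_neg h, ih]
      rw [List.filter_filter]
      apply List.filter_congr
      intro x _
      simp [List.all_cons, Bool.and_comm]

-- the count stored for x is the number of sets containing x
theorem pvCounts_getD (L : List (List Int)) (d : PySem.Dict Int Int) (x : Int) :
    (L.foldl (fun d s => (PySem.Set.ofList s).foldl (fun d x => d.modify x 0 (· + 1)) d) d).getD x 0
      = d.getD x 0 + (L.countP (fun s => decide (x ∈ s)) : Int) := by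
  induction L generalizing d with
  | nil => simp
  | cons s L ih =>
    rw [List.foldl_cons, ih, PySem.Dict.getD_foldl_modify_add_one]
    have hcnt : (PySem.Set.ofList s).count x = if x ∈ s then 1 else 0 := by
      by_cases hx : x ∈ s
      · simp only [hx, if_true]
        have hmem : x ∈ PySem.Set.ofList s := (PySem.Set.mem_ofList s x).mpr hx
        exact List.count_eq_one_of_mem (PySem.Set.nodup_ofList s) hmem
      · simp only [hx, if_false]
        rw [List.count_eq_zero]
        rw [PySem.Set.mem_ofList]
        exact hx
    rw [hcnt, List.countP_cons]
    by_cases hx : x ∈ s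
    · simp [hx]
      ring
    · simp [hx]

-- the keys of the counts dict, as iterated set updates
def pvKeysAux (L : List (List Int)) (k : PySem.Set Int) : PySem.Set Int :=
  L.foldl (fun k s => PySem.Set.update k (PySem.Set.ofList s)) k

theorem pvCounts_keys (L : List (List Int)) (d : PySem.Dict Int Int) :
    (L.foldl (fun d s => (PySem.Set.ofList s).foldl (fun d x => d.modify x 0 (· + 1)) d) d).keys
      = pvKeysAux L d.keys := by
  induction L generalizing d with
  | nil => simp [pvKeysAux]
  | cons s L ih =>
    rw [List.foldl_cons, ih, pvKeysAux, pvKeysAux, List.foldl_cons]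
    congr 1
    exact PySem.Dict.keys_foldl_modify (PySem.Set.ofList s) 0 (fun _ _ v => v + 1) d

-- filtering the accumulated keys by a predicate that forces membership in k
-- equals filtering k itself
theorem pvKeysAux_filter (L : List (List Int)) (k : PySem.Set Int) (p : Int → Bool)
    (hk : k.Nodup) (hp : ∀ x, p x = true → x ∈ k) :
    (pvKeysAux L k).filter p = k.filter p := by
  induction L generalizing k with
  | nil => simp [pvKeysAux]
  | cons s L ih =>
    rw [pvKeysAux, List.foldl_cons]
    have hstep : (PySem.Set.update k (PySem.Set.ofList s)).filter p = k.filter p := by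
      rw [PySem.Set.update_eq_append_filter, List.filter_append]
      have : ((PySem.Set.ofList (PySem.Set.ofList s)).filter
          (fun y => !k.contains y)).filter p = [] := by
        rw [List.filter_eq_nil_iff]
        intro y hy hpy
        rw [List.mem_filter] at hy
        have hyk : y ∈ k := hp y hpy
        simp only [Bool.not_eq_eq_eq_not, Bool.not_true, PySem.Set.contains_eq_listContains] at hy
        exact absurd hyk (by simpa using hy.2)
      rw [this, List.append_nil]
    rw [← hstep]
    apply ih
    · exact PySem.Set.nodup_update k (PySem.Set.ofList s) hk
    · intro x hx
      rw [PySem.Set.mem_update]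
      exact Or.inl (hp x hx)

-- ===== VERDICT (by name: the statement is the Claim_ definition above) =====
theorem common_elements_all_spec : Claim_equal_common_elements_all := by
  intro sets_list _
  unfold Spec_common_elements_all
  cases sets_list with
  | nil => decide
  | cons first rest =>
    symm
    unfold common_elements_all common_elements_all_alt
    simp only []
    rw [pvInterLoop_eq_filter]
    set p : Int → Bool := fun x =>
      ((first :: rest).foldl
        (fun d s => (PySem.Set.ofList s).foldl (fun d x => d.modify x 0 (· + 1)) d)
        (PySem.Dict.empty : PySem.Dict Int Int)).getD x 0 == ((first :: rest).length : Int)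
      with hp
    have hpchar : ∀ x, p x = true ↔ (x ∈ first ∧ rest.all (fun s => PySem.Set.contains s x) = true) := by
      intro x
      rw [hp]
      simp only [beq_iff_eq]
      rw [pvCounts_getD]
      have hle : rest.countP (fun s => decide (x ∈ s)) ≤ rest.length := List.countP_le_length
      constructor
      · intro h
        simp only [PySem.Dict.getD_empty, List.countP_cons, List.length_cons] at h
        by_cases hxf : x ∈ first
        · refine ⟨hxf, ?_⟩
          have hcnt : rest.countP (fun s => decide (x ∈ s)) = rest.length := by
            simp only [hxf, decide_true, if_true] at h
            push_cast at h
            omega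
          rw [List.all_eq_true]
          intro s hs
          rw [PySem.Set.contains_iff]
          have := (List.countP_eq_length.mp hcnt) s hs
          simpa using this
        · exfalso
          simp only [hxf, decide_false] at h
          push_cast at h
          omega
      · rintro ⟨hxf, hall⟩
        have hcnt : rest.countP (fun s => decide (x ∈ s)) = rest.length := by
          rw [List.countP_eq_length]
          intro s hs
          rw [List.all_eq_true] at hall
          have := hall s hs
          rw [PySem.Set.contains_iff] at this
          simpa using this
        simp only [PySem.Dict.getD_empty, List.countP_cons, List.length_cons, hxf,
          decide_true, if_true]
        push_cast
        omega
    have hkeys : ((first :: rest).foldl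
        (fun d s => (PySem.Set.ofList s).foldl (fun d x => d.modify x 0 (· + 1)) d)
        (PySem.Dict.empty : PySem.Dict Int Int)).keys = pvKeysAux rest (PySem.Set.ofList first) := by
      rw [pvCounts_keys]
      rw [pvKeysAux, List.foldl_cons]
      congr 1
      show PySem.Set.update (PySem.Dict.empty : PySem.Dict Int Int).keys (PySem.Set.ofList first)
          = PySem.Set.ofList first
      rw [show (PySem.Dict.empty : PySem.Dict Int Int).keys = [] from rfl]
      rw [PySem.Set.update_nil_left, PySem.Set.ofList_ofList]
    rw [hkeys]
    rw [pvKeysAux_filter rest (PySem.Set.ofList first) p (PySem.Set.nodup_ofList first)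
      (fun x hx => (PySem.Set.mem_ofList first x).mpr ((hpchar x).mp hx).1)]
    rw [PySem.Set.ofList_eq_self_of_nodup _ ((PySem.Set.nodup_ofList first).filter p)]
    apply List.filter_congr
    intro x hx
    rw [PySem.Set.mem_ofList] at hx
    by_cases hall : rest.all (fun s => PySem.Set.contains s x) = true
    · rw [(hpchar x).mpr ⟨hx, hall⟩, hall]
    · rw [Bool.not_eq_true] at hall
      have hpf : p x = false := by
        rw [← Bool.not_eq_true]
        intro hpx
        have h2 := ((hpchar x).mp hpx).2
        rw [hall] at h2
        exact Bool.false_ne_true h2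
      rw [hpf, hall]
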